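-- pv_equiv track=rewrite | github.com/popitsch/splice_sim | src/main/python/splice_sim/utils.py | create_cigatuples
-- ===== SOURCE A (Python) =====
-- def create_cigatuples(rtuples):
--     """ convert aligned block tuples to pysam cigartuples """
--     cigar_tuples=[]
--     last=None
--     for t in rtuples:
--         if last  is not None:
--             cigar_tuples+=[(3, t[0]-last-1)] # N-block
--         cigar_tuples+=[(0, t[1]-t[0]+1)] # M-block
--         last=t[1]
--     return cigar_tuples
-- ===== SOURCE B (Python) =====
-- from itertools import chain
--
-- def create_cigatuples(rtuples):
--     """ convert aligned block tuples to pysam cigartuples """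
--     rtuples = list(rtuples)
--     if not rtuples:
--         return []
--     m_blocks = [(0, t[1] - t[0] + 1) for t in rtuples]
--     n_gaps = [(3, b[0] - a[1] - 1) for a, b in zip(rtuples, rtuples[1:])]
--     return [m_blocks[0]] + list(chain.from_iterable(zip(n_gaps, m_blocks[1:])))
-- ===== Notes on version B (the rewrite author's own statement) =====
-- stated objective: alternative
-- what changed: Replaces the stateful single pass tracking `last` with two precomputed tables (M-blocks and adjacent-pair N-gaps) interleaved by a zip/chain merge.
import Mathlib
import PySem

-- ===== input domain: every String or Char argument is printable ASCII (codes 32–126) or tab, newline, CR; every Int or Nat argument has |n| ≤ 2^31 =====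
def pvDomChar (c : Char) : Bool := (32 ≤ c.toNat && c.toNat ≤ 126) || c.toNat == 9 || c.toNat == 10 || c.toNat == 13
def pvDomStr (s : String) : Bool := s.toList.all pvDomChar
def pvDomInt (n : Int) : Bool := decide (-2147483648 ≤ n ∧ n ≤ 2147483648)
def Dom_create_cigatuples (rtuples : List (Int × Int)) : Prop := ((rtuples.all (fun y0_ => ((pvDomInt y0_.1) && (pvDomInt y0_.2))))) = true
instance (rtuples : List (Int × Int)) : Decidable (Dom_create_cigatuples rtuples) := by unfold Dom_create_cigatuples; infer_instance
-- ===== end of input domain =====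

-- B replaces A's stateful single pass (tracking `last`) by two precomputed tables
-- (M-blocks, adjacent-pair N-gaps) interleaved with a zip merge; same cost, different decomposition.

-- ===== PORT A =====
-- single pass: state = (cigar_tuples, last : Option Int)
def create_cigatuples (rtuples : List (Int × Int)) : List (Int × Int) :=
  (rtuples.foldl
    (fun (st : List (Int × Int) × Option Int) t =>
      let acc :=
        match st.2 with
        | some last => st.1 ++ [(3, t.1 - last - 1)]
        | none => st.1
      (acc ++ [(0, t.2 - t.1 + 1)], some t.2))
    ([], none)).1

-- ===== PORT B =====
def create_cigatuples_alt (rtuples : List (Int × Int)) : List (Int × Int) :=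
  match rtuples with
  | [] => []
  | x :: rest =>
    let m_blocks := (x :: rest).map (fun t => ((0 : Int), t.2 - t.1 + 1))
    let n_gaps := ((x :: rest).zip rest).map (fun p => ((3 : Int), p.2.1 - p.1.2 - 1))
    [m_blocks.head!] ++ (n_gaps.zip m_blocks.tail).flatMap (fun p => [p.1, p.2])

-- ===== PRECONDITION & SPEC =====
def Spec_create_cigatuples (rtuples : List (Int × Int)) (out : List (Int × Int)) : Prop := out = create_cigatuples_alt rtuples
instance (rtuples : List (Int × Int)) (out : List (Int × Int)) : Decidable (Spec_create_cigatuples rtuples out) := by unfold Spec_create_cigatuples; infer_instance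

-- ===== CLAIM (what is proved, stated in full; the proofs are below) =====
def Claim_equal_create_cigatuples : Prop := ∀ (rtuples : List (Int × Int)), Dom_create_cigatuples rtuples → Spec_create_cigatuples rtuples (create_cigatuples rtuples)

-- ===== LEMMAS AND PROOFS =====

-- proof helper: what the rest of the loop emits once `last` is set
def pvGo (last : Int) : List (Int × Int) → List (Int × Int)
  | [] => []
  | t :: rest => (3, t.1 - last - 1) :: (0, t.2 - t.1 + 1) :: pvGo t.2 rest

theorem pvFoldl_go (rest : List (Int × Int)) :
    ∀ (acc : List (Int × Int)) (last : Int),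
    (rest.foldl
      (fun (st : List (Int × Int) × Option Int) t =>
        let acc :=
          match st.2 with
          | some last => st.1 ++ [(3, t.1 - last - 1)]
          | none => st.1
        (acc ++ [(0, t.2 - t.1 + 1)], some t.2))
      (acc, some last)).1 = acc ++ pvGo last rest := by
  induction rest with
  | nil => intro acc last; simp [pvGo]
  | cons t rest ih =>
    intro acc last
    simp only [List.foldl_cons, pvGo]
    rw [ih]
    simp

theorem pvZip_go (rest : List (Int × Int)) :
    ∀ (x : Int × Int),
    ((((x :: rest).zip rest).map (fun p => ((3 : Int), p.2.1 - p.1.2 - 1))).zip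
        (rest.map (fun t => ((0 : Int), t.2 - t.1 + 1)))).flatMap
        (fun p => [p.1, p.2]) = pvGo x.2 rest := by
  induction rest with
  | nil => intro x; simp [pvGo]
  | cons t rest ih =>
    intro x
    simp only [List.zip_cons_cons, List.map_cons, List.flatMap_cons, pvGo]
    rw [ih t]; rfl

-- ===== VERDICT (by name: the statement is the Claim_ definition above) =====
theorem create_cigatuples_spec : Claim_equal_create_cigatuples := by
  intro rtuples _
  show create_cigatuples rtuples = create_cigatuples_alt rtuples
  cases rtuples with
  | nil => rfl
  | cons x rest =>
    simp only [create_cigatuples, create_cigatuples_alt, List.foldl_cons]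
    rw [pvFoldl_go]
    simp only [List.map_cons, List.tail_cons, List.head!, List.cons_append, List.nil_append]
    exact congrArg _ (pvZip_go rest x).symm
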